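-- pv_equiv track=rewrite | github.com/aconeeny9/337Project1 | util.py | new_search_forward
-- ===== SOURCE A (Python) =====
-- def new_search_forward(data, starting_index, inclusive = False):
--     if starting_index == len(data) - 1:
--         return []
--     fragments = []
--     for index in range(starting_index+1, len(data)):
--         if inclusive:
--             fragments.append(" ".join(data[starting_index:index + 1]))
--         else:
--             fragments.append(" ".join(data[starting_index + 1:index + 1]))
--     return fragments
-- ===== SOURCE B (Python) =====
-- def new_search_forward(data, starting_index, inclusive=False):
--     # Builds each fragment by extending the previous one instead of re-slicing+re-joining.
--     if starting_index == len(data) - 1: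
--         return []
--     fragments = []
--     acc = ""
--     for index in range(starting_index + 1, len(data)):
--         if fragments:
--             acc = acc + " " + data[index]
--         elif inclusive:
--             acc = data[starting_index] + " " + data[index]
--         else:
--             acc = data[index]
--         fragments.append(acc)
--     return fragments
-- ===== Notes on version B (the rewrite author's own statement) =====
-- stated objective: alternative
-- what changed: Each fragment is built by extending the previous fragment string with one element instead of re-slicing the list and re-joining it from scratch each iteration.
-- outside the precondition, e.g. on new_search_forward(['', 'a'], -1, True): A returns ['', 'a'], B returns ['a ', 'a  a']
import Mathlib
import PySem

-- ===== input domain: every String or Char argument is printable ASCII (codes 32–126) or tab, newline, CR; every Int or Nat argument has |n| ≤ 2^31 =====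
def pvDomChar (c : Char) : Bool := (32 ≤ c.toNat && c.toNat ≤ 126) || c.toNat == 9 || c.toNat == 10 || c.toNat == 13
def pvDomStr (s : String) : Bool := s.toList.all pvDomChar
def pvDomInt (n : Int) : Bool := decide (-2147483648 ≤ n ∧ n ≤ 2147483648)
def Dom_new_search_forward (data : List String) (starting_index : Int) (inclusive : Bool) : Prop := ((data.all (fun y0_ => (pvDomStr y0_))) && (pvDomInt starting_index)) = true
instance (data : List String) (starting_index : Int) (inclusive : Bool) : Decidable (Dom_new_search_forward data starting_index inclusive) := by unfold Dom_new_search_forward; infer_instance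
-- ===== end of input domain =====

-- B builds each fragment by extending the previous fragment with one element instead of
-- re-slicing and re-joining from scratch (alternative decomposition, same asymptotics).
-- Pre_ restricts to 0 ≤ starting_index, the function's natural domain; on negative indices
-- A's slice/index wraparound yields accidental fragments (mostly empty) that B does not reproduce.


-- ===== PORT A =====
def new_search_forward (data : List String) (starting_index : Int) (inclusive : Bool) : List String :=
  if starting_index = (data.length : Int) - 1 then []
  else
    (PySem.List.pyRange (starting_index + 1) (data.length : Int) 1).foldl
      (fun fragments index =>
        if inclusive then
          fragments ++ [PySem.Str.join " " (PySem.List.slice data (some starting_index) (some (index + 1)))]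
        else
          fragments ++ [PySem.Str.join " " (PySem.List.slice data (some (starting_index + 1)) (some (index + 1)))])
      []

-- ===== PORT B =====
def new_search_forward_alt (data : List String) (starting_index : Int) (inclusive : Bool) : List String :=
  if starting_index = (data.length : Int) - 1 then []
  else
    ((PySem.List.pyRange (starting_index + 1) (data.length : Int) 1).foldl
      (fun (st : List String × String) index =>
        let acc :=
          if st.1 ≠ [] then st.2 ++ " " ++ PySem.List.pyGetD data index ""
          else if inclusive then
            PySem.List.pyGetD data starting_index "" ++ " " ++ PySem.List.pyGetD data index ""
          else PySem.List.pyGetD data index ""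
        (st.1 ++ [acc], acc))
      ([], "")).1

-- ===== PRECONDITION & SPEC =====
-- Pre_ excludes negative starting_index: A still returns there, but its value comes from
-- Python's negative slice/index wraparound (accidental empty fragments), outside the natural domain.
def Pre_new_search_forward (data : List String) (starting_index : Int) (inclusive : Bool) : Prop :=
  0 ≤ starting_index
instance (data : List String) (starting_index : Int) (inclusive : Bool) : Decidable (Pre_new_search_forward data starting_index inclusive) := by unfold Pre_new_search_forward; infer_instance

def pvWitness_new_search_forward : List String × Int × Bool := (["ab", "c d", "e"], 0, true)

def Spec_new_search_forward (data : List String) (starting_index : Int) (inclusive : Bool) (out : List String) : Prop := out = new_search_forward_alt data starting_index inclusive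
instance (data : List String) (starting_index : Int) (inclusive : Bool) (out : List String) : Decidable (Spec_new_search_forward data starting_index inclusive out) := by unfold Spec_new_search_forward; infer_instance

-- ===== CLAIM (what is proved, stated in full; the proofs are below) =====
def Claim_equal_new_search_forward : Prop := ∀ (data : List String) (starting_index : Int) (inclusive : Bool), Dom_new_search_forward data starting_index inclusive → Pre_new_search_forward data starting_index inclusive → Spec_new_search_forward data starting_index inclusive (new_search_forward data starting_index inclusive)

-- ===== LEMMAS AND PROOFS =====

theorem pvWitness_ok : Dom_new_search_forward pvWitness_new_search_forward.1 pvWitness_new_search_forward.2.1 pvWitness_new_search_forward.2.2 ∧ Pre_new_search_forward pvWitness_new_search_forward.1 pvWitness_new_search_forward.2.1 pvWitness_new_search_forward.2.2 := by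
  constructor <;> decide


theorem str_join_snoc (l : List String) (y : String) (h : l ≠ []) :
    PySem.Str.join " " (l ++ [y]) = PySem.Str.join " " l ++ " " ++ y := by
  apply String.toList_inj.mp
  simp only [PySem.Str.toList_join, String.toList_append, List.map_append, List.map_cons,
    List.map_nil]
  induction l with
  | nil => exact absurd rfl h
  | cons a t ih =>
    cases t with
    | nil =>
      simp [PySem.Chars.join_cons_cons, PySem.Chars.join_singleton]
    | cons b u =>
      have ih' := ih (by simp)
      simp only [List.map_cons, List.cons_append, PySem.Chars.join_cons_cons] at *
      rw [ih']
      simp [List.append_assoc]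

theorem str_join_singleton (a : String) : PySem.Str.join " " [a] = a := by
  apply String.toList_inj.mp
  simp [PySem.Str.toList_join, PySem.Chars.join_singleton]

theorem str_join_pair (a b : String) : PySem.Str.join " " [a, b] = a ++ " " ++ b := by
  apply String.toList_inj.mp
  simp [PySem.Str.toList_join, PySem.Chars.join_cons_cons, PySem.Chars.join_singleton]

-- slice extension: taking one more element appends data[a+q]
theorem take_drop_snoc (data : List String) (a q : Nat) (h : a + q < data.length) :
    (data.drop a).take (q + 1) = (data.drop a).take q ++ [data[a + q]] := by
  rw [List.take_add_one]
  congr 1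
  rw [List.getElem?_drop]
  simp [List.getElem?_eq_getElem (by omega : a + q < data.length)]

-- B's loop (inclusive), stated over Nat indices
theorem B_loop_incl (data : List String) (m : Nat) (t : Nat) (ht : m + 1 + t ≤ data.length) :
    (List.range t).foldl
      (fun (st : List String × String) (k : Nat) =>
        (st.1 ++ [if ¬ st.1 = [] then st.2 ++ " " ++ data.getD (m + 1 + k) ""
                  else data.getD m "" ++ " " ++ data.getD (m + 1 + k) ""],
         if ¬ st.1 = [] then st.2 ++ " " ++ data.getD (m + 1 + k) ""
         else data.getD m "" ++ " " ++ data.getD (m + 1 + k) "")) ([], "")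
    = ((List.range t).map (fun k => PySem.Str.join " " ((data.drop m).take (k + 2))),
       if t = 0 then "" else PySem.Str.join " " ((data.drop m).take (t + 1))) := by
  induction t with
  | zero => simp
  | succ t ih =>
    rw [List.range_succ, List.foldl_append, ih (by omega), List.map_append]
    cases t with
    | zero =>
      have hm : m < data.length := by omega
      have hm1 : m + 1 < data.length := by omega
      have h2 : (data.drop m).take 2 = [data[m], data[m + 1]] := by
        have := take_drop_snoc data m 0 (by omega)
        have := take_drop_snoc data m 1 (by omega)
        simp_all
      simp [h2, str_join_pair, List.getElem?_eq_getElem hm, List.getElem?_eq_getElem hm1]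
    | succ t' =>
      have hne : ((List.range (t' + 1)).map
          (fun k => PySem.Str.join " " ((data.drop m).take (k + 2)))) ≠ [] := by
        simp [List.range_succ]
      have hlt : m + 1 + (t' + 1) < data.length := by omega
      have hsnoc : (data.drop m).take (t' + 1 + 2)
          = (data.drop m).take (t' + 1 + 1) ++ [data[m + (t' + 2)]] := by
        have := take_drop_snoc data m (t' + 2) (by omega)
        simpa using this
      have hjoin := str_join_snoc ((data.drop m).take (t' + 1 + 1)) (data[m + (t' + 2)])
        (by
          have : m < data.length := by omega
          simp [List.take_eq_nil_iff, List.drop_eq_nil_iff]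
          omega)
      simp only [List.foldl_cons, List.foldl_nil, hne, not_false_iff, if_true,
        if_neg (Nat.succ_ne_zero t'), List.map_cons, List.map_nil, Prod.mk.injEq]
      have hidx : m + 1 + (t' + 1) = m + (t' + 2) := by omega
      constructor
      · congr 1
        rw [hsnoc, hjoin, hidx]
        simp [List.getElem?_eq_getElem (hidx ▸ hlt)]
      · rw [show t' + 1 + 1 + 1 = t' + 1 + 2 by omega, hsnoc, hjoin, hidx]
        simp [List.getElem?_eq_getElem (hidx ▸ hlt)]

-- B's loop (non-inclusive)
theorem B_loop_non (data : List String) (m : Nat) (t : Nat) (ht : m + 1 + t ≤ data.length) :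
    (List.range t).foldl
      (fun (st : List String × String) (k : Nat) =>
        (st.1 ++ [if ¬ st.1 = [] then st.2 ++ " " ++ data.getD (m + 1 + k) ""
                  else data.getD (m + 1 + k) ""],
         if ¬ st.1 = [] then st.2 ++ " " ++ data.getD (m + 1 + k) ""
         else data.getD (m + 1 + k) "")) ([], "")
    = ((List.range t).map (fun k => PySem.Str.join " " ((data.drop (m + 1)).take (k + 1))),
       if t = 0 then "" else PySem.Str.join " " ((data.drop (m + 1)).take t)) := by
  induction t with
  | zero => simp
  | succ t ih =>
    rw [List.range_succ, List.foldl_append, ih (by omega), List.map_append]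
    cases t with
    | zero =>
      have hm1 : m + 1 < data.length := by omega
      have h1 : (data.drop (m + 1)).take 1 = [data[m + 1]] := by
        have := take_drop_snoc data (m + 1) 0 (by omega)
        simpa using this
      simp [h1, str_join_singleton, List.getElem?_eq_getElem hm1]
    | succ t' =>
      have hne : ((List.range (t' + 1)).map
          (fun k => PySem.Str.join " " ((data.drop (m + 1)).take (k + 1)))) ≠ [] := by
        simp [List.range_succ]
      have hlt : m + 1 + (t' + 1) < data.length := by omega
      have hsnoc : (data.drop (m + 1)).take (t' + 1 + 1)
          = (data.drop (m + 1)).take (t' + 1) ++ [data[m + 1 + (t' + 1)]] := by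
        have := take_drop_snoc data (m + 1) (t' + 1) (by omega)
        simpa using this
      have hjoin := str_join_snoc ((data.drop (m + 1)).take (t' + 1)) (data[m + 1 + (t' + 1)])
        (by
          simp [List.take_eq_nil_iff, List.drop_eq_nil_iff]
          omega)
      simp only [List.foldl_cons, List.foldl_nil, hne, not_false_iff, if_true,
        if_neg (Nat.succ_ne_zero t'), List.map_cons, List.map_nil, Prod.mk.injEq]
      constructor
      · congr 1
        rw [hsnoc, hjoin]
        simp [List.getElem?_eq_getElem hlt]
      · rw [hsnoc, hjoin]
        simp [List.getElem?_eq_getElem hlt]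

-- ===== VERDICT (by name: the statement is the Claim_ definition above) =====
theorem new_search_forward_spec : Claim_equal_new_search_forward := by
  intro data s inclusive _ hpre
  unfold Spec_new_search_forward new_search_forward new_search_forward_alt
  obtain ⟨m, rfl⟩ := Int.eq_ofNat_of_zero_le hpre
  by_cases hg : ((m : Nat) : Int) = (data.length : Int) - 1
  · simp [hg]
  · rw [if_neg hg, if_neg hg]
    by_cases hmn : m + 1 ≤ data.length
    · have htn : (((data.length : Int)) - ((m : Nat) + 1)).toNat = data.length - (m + 1) := by
        omega
      rw [PySem.List.pyRange_one, htn, List.foldl_map, List.foldl_map]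
      set t := data.length - (m + 1) with htdef
      have ht : m + 1 + t ≤ data.length := by omega
      have hcast3 : ((m : Int) + 1) = ((m + 1 : Nat) : Int) := by push_cast; ring
      have hcast1 : ∀ k : Nat, (((m + 1 : Nat) : Int) + (k : Int) + 1) = ((m + 2 + k : Nat) : Int) := by
        intro k; push_cast; ring
      have hcast2 : ∀ k : Nat, (((m + 1 : Nat) : Int) + (k : Int)) = ((m + 1 + k : Nat) : Int) := by
        intro k; push_cast; ring
      have hcast4 : ∀ k : Nat, (((m + 1 + k : Nat) : Int) + 1) = ((m + 2 + k : Nat) : Int) := by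
        intro k; push_cast; ring
      have hsub1 : ∀ k : Nat, m + 2 + k - m = k + 2 := by intro k; omega
      have hsub2 : ∀ k : Nat, m + 2 + k - (m + 1) = k + 1 := by intro k; omega
      cases inclusive with
      | true =>
        simp only [if_true, ne_eq, hcast3,
          hcast2, hcast4, PySem.List.slice_natCast, PySem.List.pyGetD_natCast, hsub1]
        rw [PySem.List.foldl_append_singleton_eq_map, B_loop_incl data m t ht]
        rfl
      | false =>
        simp only [Bool.false_eq_true, reduceIte, ne_eq, hcast3, hcast1,
          hcast2, hcast4, PySem.List.slice_natCast, PySem.List.pyGetD_natCast, hsub2]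
        rw [PySem.List.foldl_append_singleton_eq_map, B_loop_non data m t ht]
        rfl
    · have he : PySem.List.pyRange ((m : Int) + 1) ((data.length : Int)) 1 = [] :=
        PySem.List.pyRange_one_eq_nil (by omega)
      rw [he]
      simp
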